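-- pv_equiv track=rewrite | github.com/MegaGeese/Coding-Practice | Christmas Tree Hash/ChristmasTreeHash.py | stepOne
-- ===== SOURCE A (Python) =====
-- def stepOne(tree):
--     output = [tree[0][0]]
--
--     for i in tree[0]:
--         for j in tree[1]:
--             output.append(i * j)
--             for k in tree[2]:
--                 output.append(i * j * k)
--                 for l in tree[3]:
--                     output.append(i * j * k * l)
--                     for m in tree[4]:
--                         output.append(i * j * k * l * m)
--                         for n in tree[5]:
--                             output.append(i * j * k * l * m * n)
--                             for o in tree[6]:
--                                 output.append(i * j * k * l * m * n * o)
--     return output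
-- ===== SOURCE B (Python) =====
-- def stepOne(tree):
--     output = [tree[0][0]]
--
--     def rec(prod, level):
--         for x in tree[level]:
--             p = prod * x
--             output.append(p)
--             if level < 6:
--                 rec(p, level + 1)
--
--     for i in tree[0]:
--         rec(i, 1)
--     return output
-- ===== Notes on version B (the rewrite author's own statement) =====
-- stated objective: simpler
-- what changed: A recursive helper over the level index replaces the seven hard-coded nested loops, carrying the running product and emitting values in the same order.
import Mathlib
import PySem

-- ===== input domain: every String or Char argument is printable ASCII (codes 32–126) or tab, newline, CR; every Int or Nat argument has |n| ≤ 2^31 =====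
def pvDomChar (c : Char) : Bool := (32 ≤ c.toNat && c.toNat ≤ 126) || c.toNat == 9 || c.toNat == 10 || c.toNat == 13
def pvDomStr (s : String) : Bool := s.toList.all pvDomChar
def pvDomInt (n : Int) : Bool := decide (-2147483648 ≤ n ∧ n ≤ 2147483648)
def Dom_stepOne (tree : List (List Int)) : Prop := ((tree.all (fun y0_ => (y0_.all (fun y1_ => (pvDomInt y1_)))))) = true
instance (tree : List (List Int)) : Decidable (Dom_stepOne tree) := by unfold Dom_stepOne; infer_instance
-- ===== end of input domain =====

-- B replaces A's seven hard-coded nested loops by a recursive helper over the level index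
-- carrying the running product (same values, same order): simpler, not faster.


-- ===== PORT A =====
-- literal transliteration of A's seven nested loops; tree[L] / tree[0][0] are read with getD,
-- exact on Pre_stepOne (outside Pre_ the Python raises IndexError and nothing is claimed)
def stepOne (tree : List (List Int)) : List Int :=
  let output : List Int := [(tree.getD 0 []).getD 0 0]
  (tree.getD 0 []).foldl (fun output i =>
    (tree.getD 1 []).foldl (fun output j =>
      let output := output ++ [i * j]
      (tree.getD 2 []).foldl (fun output k =>
        let output := output ++ [i * j * k]
        (tree.getD 3 []).foldl (fun output l =>
          let output := output ++ [i * j * k * l]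
          (tree.getD 4 []).foldl (fun output m =>
            let output := output ++ [i * j * k * l * m]
            (tree.getD 5 []).foldl (fun output n =>
              let output := output ++ [i * j * k * l * m * n]
              (tree.getD 6 []).foldl (fun output o =>
                output ++ [i * j * k * l * m * n * o]) output) output) output) output) output)
      output) output

-- ===== PORT B =====
-- transliteration of Source B's recursive helper rec(prod, level); the accumulated output list is
-- threaded explicitly (Python mutates the closed-over list)
def stepOneRec (tree : List (List Int)) (prod : Int) (level : Nat) (out : List Int) : List Int :=
  (tree.getD level []).foldl (fun out x =>
    let p := prod * x
    let out := out ++ [p]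
    if h : level < 6 then stepOneRec tree p (level + 1) out else out) out
termination_by 6 - level
decreasing_by omega

def stepOne_alt (tree : List (List Int)) : List Int :=
  let output : List Int := [(tree.getD 0 []).getD 0 0]
  (tree.getD 0 []).foldl (fun output i => stepOneRec tree i 1 output) output

-- ===== PRECONDITION & SPEC =====
-- Pre_ = exactly the inputs where the Python A returns: tree[0][0] exists, and each level list
-- tree[L] (L = 1..6) exists whenever all earlier-level lists are nonempty (else IndexError).
def Pre_stepOne (tree : List (List Int)) : Prop :=
  tree ≠ [] ∧ tree.getD 0 [] ≠ [] ∧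
  ∀ L ∈ [1, 2, 3, 4, 5, 6], ((∀ j ∈ List.range L, tree.getD j [] ≠ []) → L < tree.length)
instance (tree : List (List Int)) : Decidable (Pre_stepOne tree) := by
  unfold Pre_stepOne; infer_instance
def pvWitness_stepOne : List (List Int) := [[1], [2, 3], [4], [1], [5], [1], [2]]

def Spec_stepOne (tree : List (List Int)) (out : List Int) : Prop := out = stepOne_alt tree
instance (tree : List (List Int)) (out : List Int) : Decidable (Spec_stepOne tree out) := by unfold Spec_stepOne; infer_instance

-- ===== CLAIM (what is proved, stated in full; the proofs are below) =====
def Claim_equal_stepOne : Prop := ∀ (tree : List (List Int)), Dom_stepOne tree → Pre_stepOne tree → Spec_stepOne tree (stepOne tree)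

-- ===== LEMMAS AND PROOFS =====

lemma stepOneRec_six (tree : List (List Int)) (prod : Int) (out : List Int) :
    stepOneRec tree prod 6 out
      = (tree.getD 6 []).foldl (fun out o => out ++ [prod * o]) out := by
  rw [stepOneRec]; simp

lemma stepOneRec_lt (tree : List (List Int)) (prod : Int) (level : Nat) (h : level < 6)
    (out : List Int) :
    stepOneRec tree prod level out
      = (tree.getD level []).foldl
          (fun out x => stepOneRec tree (prod * x) (level + 1) (out ++ [prod * x])) out := by
  rw [stepOneRec]; simp [h]

theorem stepOne_eq_alt (tree : List (List Int)) : stepOne tree = stepOne_alt tree := by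
  simp only [stepOne, stepOne_alt,
    stepOneRec_lt tree _ 1 (by omega),
    stepOneRec_lt _ _ 2 (by omega),
    stepOneRec_lt _ _ 3 (by omega),
    stepOneRec_lt _ _ 4 (by omega),
    stepOneRec_lt _ _ 5 (by omega)]
  simp only [Nat.reduceAdd, stepOneRec_six]

-- ===== VERDICT (by name: the statement is the Claim_ definition above) =====
theorem stepOne_spec : Claim_equal_stepOne := by
  intro tree _ _
  unfold Spec_stepOne
  exact stepOne_eq_alt tree
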